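-- pv_equiv track=rewrite | github.com/pypi-data/pypi-mirror-337 | packages/liteauto/liteauto-0.2.25.tar.gz/liteauto-0.2.25/liteauto/searchlite/legacy/core.py | extract_urls
-- ===== SOURCE A (Python) =====
-- def extract_urls(atags):
--     all_urls = [u.get("href") for u in atags if u.get("href")]
--
--     filtered_urls = [url for url in all_urls if 'google' not in url]
--
--     yt_urls = []
--     non_yt_urls = []
--     for url in filtered_urls:
--         if 'youtube' in url:
--             yt_urls.append(url)
--         else:
--             non_yt_urls.append(url)
--
--     return non_yt_urls + yt_urls
-- ===== SOURCE B (Python) =====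
-- def extract_urls(atags):
--     hrefs = (u.get("href") for u in atags)
--     filtered = [h for h in hrefs if h and 'google' not in h]
--     return sorted(filtered, key=lambda url: 'youtube' in url)
-- ===== Notes on version B (the rewrite author's own statement) =====
-- stated objective: simpler
-- what changed: The manual two-list partition loop and concatenation is replaced by a single stable sort keyed on the boolean 'youtube' in url, and the two comprehensions are fused into one filtering pass.
import Mathlib
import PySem

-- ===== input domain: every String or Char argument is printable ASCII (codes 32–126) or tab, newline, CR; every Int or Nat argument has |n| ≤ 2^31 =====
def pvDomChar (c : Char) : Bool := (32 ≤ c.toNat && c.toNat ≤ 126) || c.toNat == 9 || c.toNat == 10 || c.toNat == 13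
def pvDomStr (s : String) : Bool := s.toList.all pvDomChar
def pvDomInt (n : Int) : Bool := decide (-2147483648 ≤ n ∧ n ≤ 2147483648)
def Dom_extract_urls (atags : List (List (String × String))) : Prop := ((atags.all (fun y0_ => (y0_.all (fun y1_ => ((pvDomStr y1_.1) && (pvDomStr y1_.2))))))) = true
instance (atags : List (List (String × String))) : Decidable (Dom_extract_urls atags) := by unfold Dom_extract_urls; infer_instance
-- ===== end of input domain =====

-- B replaces A's manual two-list partition loop by a single stable sort keyed on the
-- boolean 'youtube' in url, and fuses the two comprehensions into one pass (objective: simpler).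

-- ===== PORT A =====
def extract_urls (atags : List (List (String × String))) : List String :=
  -- [u.get("href") for u in atags if u.get("href")]
  let all_urls : List String := atags.filterMap (fun u =>
    match (PySem.Dict.mk u).get? "href" with
    | some s => if s ≠ "" then some s else none
    | none => none)
  -- [url for url in all_urls if 'google' not in url]
  let filtered_urls := all_urls.filter (fun url => !(PySem.Str.isIn "google" url))
  -- the partition loop over filtered_urls (state: (yt_urls, non_yt_urls))
  let p := filtered_urls.foldl (fun (acc : List String × List String) url =>
    if PySem.Str.isIn "youtube" url then (acc.1 ++ [url], acc.2) else (acc.1, acc.2 ++ [url]))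
    ([], [])
  p.2 ++ p.1

-- ===== PORT B =====
def extract_urls_alt (atags : List (List (String × String))) : List String :=
  -- [h for h in (u.get("href") for u in atags) if h and 'google' not in h]
  let filtered : List String := atags.filterMap (fun u =>
    match (PySem.Dict.mk u).get? "href" with
    | some h => if h ≠ "" ∧ ¬(PySem.Str.isIn "google" h) then some h else none
    | none => none)
  -- sorted(filtered, key=lambda url: 'youtube' in url)  (bool key: False = 0 < True = 1)
  PySem.List.sorted filtered (fun url => (if PySem.Str.isIn "youtube" url then 1 else 0 : Nat))

-- ===== PRECONDITION & SPEC =====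
def Spec_extract_urls (atags : List (List (String × String))) (out : List String) : Prop := out = extract_urls_alt atags
instance (atags : List (List (String × String))) (out : List String) : Decidable (Spec_extract_urls atags out) := by unfold Spec_extract_urls; infer_instance

-- ===== CLAIM (what is proved, stated in full; the proofs are below) =====
def Claim_equal_extract_urls : Prop := ∀ (atags : List (List (String × String))), Dom_extract_urls atags → Spec_extract_urls atags (extract_urls atags)

-- ===== LEMMAS AND PROOFS =====

-- insertBy passes over a prefix it is never 'before'
theorem insertBy_append_of_forall_not_before {α : Type} (before : α → α → Bool) (x : α)
    (A0 A1 : List α) (h : ∀ y ∈ A0, before x y = false) :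
    PySem.List.insertBy before x (A0 ++ A1) = A0 ++ PySem.List.insertBy before x A1 := by
  induction A0 with
  | nil => simp
  | cons a t ih =>
    simp only [List.cons_append, PySem.List.insertBy, h a (by simp)]
    simp [ih (fun y hy => h y (by simp [hy]))]

-- a stable sort by a 0/1 key is the partition: non-matching elements first, in order
theorem foldl_insertBy_bool (b : String → Bool) :
    ∀ (xs A0 A1 : List String), (∀ y ∈ A0, b y = false) → (∀ y ∈ A1, b y = true) →
    xs.foldl (fun acc x =>
        PySem.List.insertBy (fun a c => decide ((if b a then (1:Nat) else 0) < (if b c then (1:Nat) else 0))) x acc)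
      (A0 ++ A1)
    = (A0 ++ xs.filter (fun x => !b x)) ++ (A1 ++ xs.filter b) := by
  intro xs
  induction xs with
  | nil => intro A0 A1 _ _; simp
  | cons x t ih =>
    intro A0 A1 h0 h1
    by_cases hb : b x = true
    · have hstep : PySem.List.insertBy
          (fun a c => decide ((if b a then (1:Nat) else 0) < (if b c then (1:Nat) else 0))) x (A0 ++ A1)
          = A0 ++ (A1 ++ [x]) := by
        rw [PySem.List.insertBy_of_forall_not_before]
        · simp
        · intro y _; simp [hb]; split <;> simp
      simp only [List.foldl_cons, hstep]
      rw [ih A0 (A1 ++ [x]) h0 (by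
        intro y hy
        rcases List.mem_append.1 hy with h | h
        · exact h1 y h
        · simp at h; simpa [h] using hb)]
      simp [hb]
    · have hb' : b x = false := by simpa using hb
      have hstep : PySem.List.insertBy
          (fun a c => decide ((if b a then (1:Nat) else 0) < (if b c then (1:Nat) else 0))) x (A0 ++ A1)
          = (A0 ++ [x]) ++ A1 := by
        rw [insertBy_append_of_forall_not_before _ _ _ _ (by intro y hy; simp [hb', h0 y hy])]
        cases A1 with
        | nil => simp [PySem.List.insertBy]
        | cons a s => simp [PySem.List.insertBy, hb', h1 a (by simp)]
      simp only [List.foldl_cons, hstep]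
      rw [ih (A0 ++ [x]) A1 (by
        intro y hy
        rcases List.mem_append.1 hy with h | h
        · exact h0 y h
        · simp at h; simpa [h] using hb') h1]
      simp [hb']

-- A's partition loop computes (filter b, filter (¬b)) appended to the starting state
theorem foldl_partition (b : String → Bool) :
    ∀ (xs : List String) (p : List String × List String),
    xs.foldl (fun (acc : List String × List String) url =>
        if b url then (acc.1 ++ [url], acc.2) else (acc.1, acc.2 ++ [url])) p
    = (p.1 ++ xs.filter b, p.2 ++ xs.filter (fun x => !b x)) := by
  intro xs
  induction xs with
  | nil => intro p; simp
  | cons x t ih =>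
    intro p
    by_cases hb : b x = true
    · simp [List.foldl_cons, hb, ih]
    · have hb' : b x = false := by simpa using hb
      simp [List.foldl_cons, hb', ih]

-- the two extraction pipelines produce the same list
theorem extraction_eq (atags : List (List (String × String))) :
    (atags.filterMap (fun u =>
      match (PySem.Dict.mk u).get? "href" with
      | some s => if s ≠ "" then some s else none
      | none => none)).filter (fun url => !(PySem.Str.isIn "google" url))
    = atags.filterMap (fun u =>
      match (PySem.Dict.mk u).get? "href" with
      | some h => if h ≠ "" ∧ ¬(PySem.Str.isIn "google" h) then some h else none
      | none => none) := by
  induction atags with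
  | nil => simp
  | cons u t ih =>
    simp only [List.filterMap_cons]
    cases hg : (PySem.Dict.mk u).get? "href" with
    | none => simpa using ih
    | some s =>
      by_cases hs : s = ""
      · simpa [hs] using ih
      · simp [PySem.Str.isIn] at ih
        cases hgoog : PySem.Chars.isIn ['g', 'o', 'o', 'g', 'l', 'e'] s.toList
        · simp [hs, PySem.Str.isIn, hgoog, ih]
        · simp [hs, PySem.Str.isIn, hgoog, ih]

-- A's partition-loop result equals B's insertion-sort fold, for any boolean test
theorem partition_eq_sort (b : String → Bool) (xs : List String) :
    (xs.foldl (fun (acc : List String × List String) url =>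
        if b url then (acc.1 ++ [url], acc.2) else (acc.1, acc.2 ++ [url])) ([], [])).2
    ++ (xs.foldl (fun (acc : List String × List String) url =>
        if b url then (acc.1 ++ [url], acc.2) else (acc.1, acc.2 ++ [url])) ([], [])).1
    = xs.foldl (fun acc x =>
        PySem.List.insertBy (fun a c => decide ((if b a then (1:Nat) else 0) < (if b c then (1:Nat) else 0))) x acc)
      [] := by
  have h := foldl_insertBy_bool b xs [] [] (by simp) (by simp)
  simp only [List.nil_append] at h
  rw [foldl_partition b, h]
  simp

-- ===== VERDICT (by name: the statement is the Claim_ definition above) =====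
theorem extract_urls_spec : Claim_equal_extract_urls := by
  intro atags _
  unfold Spec_extract_urls extract_urls extract_urls_alt
  simp only [← extraction_eq atags, PySem.List.sorted_eq_foldl_insertBy,
    partition_eq_sort (fun url => PySem.Str.isIn "youtube" url)]
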